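-- pv_equiv track=rewrite | github.com/marcant-oss/shorewall-nft | packages/shorewall-nft/shorewall_nft/config/zones.py | _parse_option_values
-- ===== SOURCE A (Python) =====
-- def _split_options_respecting_parens(text: str) -> list[str]:
--     """Split a comma-separated options string, respecting paren grouping.
--
--     Shorewall list-valued options use ``key=(v1,v2,...)`` syntax (see
--     ``shorewall-interfaces(5)`` ``sfilter=(net[,...])``).  Naive
--     ``str.split(",")`` would break the inner list — this helper splits
--     only on commas at depth 0.
--     """
--     out: list[str] = []
--     depth = 0
--     cur: list[str] = []
--     for c in text:
--         if c == "(":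
--             depth += 1
--             cur.append(c)
--         elif c == ")":
--             depth = max(0, depth - 1)
--             cur.append(c)
--         elif c == "," and depth == 0:
--             tok = "".join(cur).strip()
--             if tok:
--                 out.append(tok)
--             cur = []
--         else:
--             cur.append(c)
--     tail = "".join(cur).strip()
--     if tail:
--         out.append(tail)
--     return out
--
-- def _parse_option_values(text: str) -> dict[str, str]:
--     """Parse key=value pairs from a comma-separated options string.
--
--     Returns a dict of ``{key: value}`` for options that use ``key=value``
--     syntax (e.g. ``mss=1452``, ``sourceroute=0``). Simple flag options
--     without ``=`` are not included.
--
--     List-valued options written as ``key=(v1,v2)`` have the surrounding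
--     parens stripped — the dict value is the inner ``v1,v2`` string.
--     """
--     if not text or text == "-":
--         return {}
--     result: dict[str, str] = {}
--     for tok in _split_options_respecting_parens(text):
--         if "=" in tok:
--             key, _, val = tok.partition("=")
--             val = val.strip()
--             if val.startswith("(") and val.endswith(")"):
--                 val = val[1:-1].strip()
--             result[key.strip()] = val
--     return result
-- ===== SOURCE B (Python) =====
-- def _parse_option_values(text: str) -> dict[str, str]:
--     """Index-based: record the positions of depth-0 commas, then parse the
--     slices between consecutive cut points; no token buffer is maintained."""
--     if not text or text == "-":
--         return {}
--     cuts = [-1]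
--     depth = 0
--     for i, c in enumerate(text):
--         if c == "(":
--             depth += 1
--         elif c == ")":
--             depth = max(0, depth - 1)
--         elif c == "," and depth == 0:
--             cuts.append(i)
--     cuts.append(len(text))
--     result: dict[str, str] = {}
--     for a, b in zip(cuts, cuts[1:]):
--         tok = text[a + 1:b].strip()
--         eq = tok.find("=")
--         if eq < 0:
--             continue
--         key = tok[:eq].strip()
--         val = tok[eq + 1:].strip()
--         if val.startswith("(") and val.endswith(")"):
--             val = val[1:-1].strip()
--         result[key] = val
--     return result
-- ===== Notes on version B (the rewrite author's own statement) =====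
-- stated objective: alternative
-- what changed: Instead of accumulating character buffers and an intermediate token list, B records only the integer positions of depth-0 commas in one scan, then parses the slices of the original string between consecutive cut points directly into the dict.
import Mathlib
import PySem

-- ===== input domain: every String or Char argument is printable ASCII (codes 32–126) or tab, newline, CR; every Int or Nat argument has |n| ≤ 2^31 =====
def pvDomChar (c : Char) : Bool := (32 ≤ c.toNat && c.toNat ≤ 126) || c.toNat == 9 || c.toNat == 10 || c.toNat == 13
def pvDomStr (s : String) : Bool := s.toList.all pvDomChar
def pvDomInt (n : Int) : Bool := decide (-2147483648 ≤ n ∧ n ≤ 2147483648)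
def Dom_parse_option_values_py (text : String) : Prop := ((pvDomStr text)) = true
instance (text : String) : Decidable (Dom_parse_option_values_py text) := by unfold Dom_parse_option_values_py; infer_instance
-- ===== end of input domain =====

-- B replaces A's buffer-accumulating two-pass design by an index-based one: it
-- records the positions of depth-0 commas, then parses the slices between
-- consecutive cut points; same return value for every input.


-- ===== PORT A =====
-- one step of _split_options_respecting_parens' for-loop; state = (out, depth, cur)
def pvAStep (st : List (List Char) × Int × List Char) (c : Char) :
    List (List Char) × Int × List Char :=
  let (out, depth, cur) := st
  if c = '(' then (out, depth + 1, cur ++ [c])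
  else if c = ')' then (out, max 0 (depth - 1), cur ++ [c])
  else if c = ',' ∧ depth = 0 then
    let tok := PySem.Chars.strip cur
    (if tok = [] then out else out ++ [tok], depth, [])
  else (out, depth, cur ++ [c])

def pvSplitParens (text : List Char) : List (List Char) :=
  let r := text.foldl pvAStep ([], 0, [])
  let tail := PySem.Chars.strip r.2.2
  if tail = [] then r.1 else r.1 ++ [tail]

-- body of _parse_option_values' for-loop; tok.partition("=") is ported exactly
-- (PySem has no partition) as find + take/drop, valid under the '"=" in tok' guard
def pvATok (d : PySem.Dict String String) (tok : List Char) : PySem.Dict String String :=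
  if PySem.Chars.isIn ['='] tok then
    let i := (PySem.Chars.find tok ['=']).toNat
    let key := tok.take i
    let val := tok.drop (i + 1)
    let val := PySem.Chars.strip val
    let val := if PySem.Chars.startswith val ['('] ∧ PySem.Chars.endswith val [')'] then
        PySem.Chars.strip ((val.drop 1).dropLast)   -- val[1:-1].strip()
      else val
    d.insert (String.ofList (PySem.Chars.strip key)) (String.ofList val)
  else d

def parse_option_values_py (text : String) : List (String × String) :=
  if text = "" ∨ text = "-" then []
  else ((pvSplitParens text.toList).foldl pvATok PySem.Dict.empty).items

-- ===== PORT B =====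
-- one step of B's enumerate loop; state = (cuts, depth)
def pvCutStep (st : List Int × Int) (ic : Int × Char) : List Int × Int :=
  let (cuts, depth) := st
  if ic.2 = '(' then (cuts, depth + 1)
  else if ic.2 = ')' then (cuts, max 0 (depth - 1))
  else if ic.2 = ',' ∧ depth = 0 then (cuts ++ [ic.1], depth)
  else (cuts, depth)

-- body of B's zip-loop: parse the slice text[a+1:b] into the dict
def pvBTok (cs : List Char) (d : PySem.Dict String String) (ab : Int × Int) :
    PySem.Dict String String :=
  let tok := PySem.Chars.strip (PySem.List.slice cs (some (ab.1 + 1)) (some ab.2))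
  let eq := PySem.Chars.find tok ['=']
  if eq < 0 then d
  else
    let key := PySem.Chars.strip (tok.take eq.toNat)
    let val := PySem.Chars.strip (tok.drop (eq.toNat + 1))
    let val := if PySem.Chars.startswith val ['('] ∧ PySem.Chars.endswith val [')'] then
        PySem.Chars.strip ((val.drop 1).dropLast)   -- val[1:-1].strip()
      else val
    d.insert (String.ofList key) (String.ofList val)

def parse_option_values_py_alt (text : String) : List (String × String) :=
  if text = "" ∨ text = "-" then []
  else
    let cs := text.toList
    let r := (PySem.List.enumerate cs).foldl pvCutStep ([-1], 0)
    let cuts := r.1 ++ [(cs.length : Int)]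
    ((cuts.zip (cuts.drop 1)).foldl (pvBTok cs) PySem.Dict.empty).items

-- ===== PRECONDITION & SPEC =====
def Spec_parse_option_values_py (text : String) (out : List (String × String)) : Prop := out = parse_option_values_py_alt text
instance (text : String) (out : List (String × String)) : Decidable (Spec_parse_option_values_py text out) := by unfold Spec_parse_option_values_py; infer_instance

-- ===== CLAIM (what is proved, stated in full; the proofs are below) =====
def Claim_equal_parse_option_values_py : Prop := ∀ (text : String), Dom_parse_option_values_py text → Spec_parse_option_values_py text (parse_option_values_py text)

-- ===== LEMMAS AND PROOFS =====

-- the stripped token between cut points a and b of cs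
def pvTokOf (cs : List Char) (ab : Int × Int) : List Char :=
  PySem.Chars.strip (PySem.List.slice cs (some (ab.1 + 1)) (some ab.2))

-- the (filtered) token list B's cut list denotes
def pvToks (cs : List Char) (cuts : List Int) : List (List Char) :=
  (((cuts.zip (cuts.drop 1)).map (pvTokOf cs)).filter (· ≠ []))

-- A's per-token action on an empty token does nothing ('=' not in "")
theorem pvATok_nil (d : PySem.Dict String String) : pvATok d [] = d := by
  have h : PySem.Chars.isIn ['='] ([] : List Char) = false := by decide
  simp [pvATok, h]

-- B's slice parse is A's per-token action on the denoted token
theorem pvBTok_eq (cs : List Char) (d : PySem.Dict String String) (ab : Int × Int) :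
    pvBTok cs d ab = pvATok d (pvTokOf cs ab) := by
  unfold pvBTok pvATok pvTokOf
  by_cases h : PySem.Chars.isIn ['='] (PySem.Chars.strip (PySem.List.slice cs (some (ab.1 + 1)) (some ab.2)))
  · have h0 : (0 : Int) ≤ PySem.Chars.find (PySem.Chars.strip (PySem.List.slice cs (some (ab.1 + 1)) (some ab.2))) ['='] :=
      (PySem.Chars.find_nonneg_iff _ _).mpr ((PySem.Chars.isIn_iff_infix _ _).mp h)
    simp only [h, if_true, if_neg (by omega : ¬ PySem.Chars.find (PySem.Chars.strip (PySem.List.slice cs (some (ab.1 + 1)) (some ab.2))) ['='] < 0)]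
  · have h1 : PySem.Chars.find (PySem.Chars.strip (PySem.List.slice cs (some (ab.1 + 1)) (some ab.2))) ['='] = -1 :=
      (PySem.Chars.find_eq_neg_one_iff _ _).mpr (fun hi => h ((PySem.Chars.isIn_iff_infix _ _).mpr hi))
    simp [h, h1]

-- folding pvATok skips empty tokens, so the filter in pvToks is invisible to the dict
theorem pvATok_foldl_filter (l : List (List Char)) (d : PySem.Dict String String) :
    (l.filter (· ≠ [])).foldl pvATok d = l.foldl pvATok d := by
  induction l generalizing d with
  | nil => rfl
  | cons t l ih =>
    by_cases h : t = []
    · subst h; simpa [pvATok_nil] using ih d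
    · simp only [List.filter_cons, h, ne_eq, not_false_iff, decide_true, if_true, List.foldl_cons]
      exact ih _

-- consecutive pairs of an extended cut list
theorem pvPairs_aux (cuts : List Int) (a k : Int) :
    ((a :: cuts) ++ [k]).zip (cuts ++ [k]) =
      (a :: cuts).zip cuts ++ [((a :: cuts).getLast (by simp), k)] := by
  induction cuts generalizing a with
  | nil => rfl
  | cons b cuts ih =>
    simp only [List.cons_append, List.zip_cons_cons] at ih ⊢
    rw [List.getLast_cons (by simp)]
    rw [ih b]

theorem pvPairs_append (cuts : List Int) (h : cuts ≠ []) (k : Int) :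
    (cuts ++ [k]).zip ((cuts ++ [k]).drop 1) =
      cuts.zip (cuts.drop 1) ++ [(cuts.getLast h, k)] := by
  cases cuts with
  | nil => exact absurd rfl h
  | cons a cuts => simpa using pvPairs_aux cuts a k

-- the token a cut pair (L, |p|) denotes in p ++ rest is the stripped suffix of p after L
theorem pvTokOf_eq (p rest : List Char) (L : Int) (h0 : -1 ≤ L) (h1 : L + 1 ≤ (p.length : Int)) :
    pvTokOf (p ++ rest) (L, (p.length : Int)) =
      PySem.Chars.strip (p.drop (L + 1).toNat) := by
  unfold pvTokOf
  rw [PySem.List.slice_toNat _ (by omega) (by positivity)]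
  have ha : (L + 1).toNat ≤ p.length := Int.toNat_le.mpr h1
  rw [List.drop_append_of_le_length ha,
      List.take_append_of_le_length (by simp),
      List.take_of_length_le (by simp)]

-- MAIN INVARIANT. cs = p ++ s with p processed: A's state is (out, d, cur) where
-- cur is what p holds after the last cut L, out the tokens of the cuts so far;
-- then A's final token list equals the tokens denoted by B's final cut list.
theorem pvMain (s : List Char) : ∀ (p : List Char) (d : Int) (cuts : List Int) (hne : cuts ≠ [])
    (_ : -1 ≤ cuts.getLast hne) (_ : (cuts.getLast hne) + 1 ≤ (p.length : Int)),
    (let r := s.foldl pvAStep (pvToks (p ++ s) cuts, d, p.drop ((cuts.getLast hne) + 1).toNat)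
     let tail := PySem.Chars.strip r.2.2
     if tail = [] then r.1 else r.1 ++ [tail]) =
    pvToks (p ++ s)
      (((PySem.List.enumerate s (p.length : Int)).foldl pvCutStep (cuts, d)).1
        ++ [((p ++ s).length : Int)]) := by
  induction s with
  | nil =>
    intro p d cuts hne hL0 hL1
    simp only [List.foldl_nil, PySem.List.enumerate_nil, List.append_nil]
    unfold pvToks
    rw [pvPairs_append cuts hne, List.map_append, List.filter_append]
    have htok := pvTokOf_eq p [] (cuts.getLast hne) hL0 hL1
    simp only [List.append_nil] at htok
    simp only [List.map_cons, List.map_nil, htok]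
    by_cases hc : PySem.Chars.strip (p.drop ((cuts.getLast hne) + 1).toNat) = []
    · simp [hc]
    · simp [hc]
  | cons c s ih =>
    intro p d cuts hne hL0 hL1
    have hlen : (p ++ [c]).length = p.length + 1 := by simp
    have hcast : ((p.length : Int) + 1) = (((p ++ [c]).length : Nat) : Int) := by
      rw [hlen]; push_cast; ring
    have happ : p ++ c :: s = (p ++ [c]) ++ s := by simp
    simp only [List.foldl_cons, PySem.List.enumerate_cons]
    have hdropc : (p ++ [c]).drop ((cuts.getLast hne) + 1).toNat
        = p.drop ((cuts.getLast hne) + 1).toNat ++ [c] :=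
      List.drop_append_of_le_length (Int.toNat_le.mpr hL1)
    by_cases h1 : c = '('
    · simp only [pvAStep, pvCutStep, if_pos h1]
      rw [happ, hcast]
      have := ih (p ++ [c]) (d + 1) cuts hne hL0 (by rw [← hcast]; omega)
      rw [hdropc] at this
      exact this
    · by_cases h2 : c = ')'
      · simp only [pvAStep, pvCutStep, if_neg h1, if_pos h2]
        rw [happ, hcast]
        have := ih (p ++ [c]) (max 0 (d - 1)) cuts hne hL0 (by rw [← hcast]; omega)
        rw [hdropc] at this
        exact this
      · by_cases h3 : c = ',' ∧ d = 0
        · obtain ⟨hc, hd⟩ := h3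
          subst hd; subst hc
          simp only [pvAStep, pvCutStep, if_neg (by decide : ¬((',' : Char) = '(')),
            if_neg (by decide : ¬((',' : Char) = ')')),
            and_self, if_true]
          rw [happ, hcast]
          have hne' : cuts ++ [(p.length : Int)] ≠ [] := by simp
          have hlast' : (cuts ++ [(p.length : Int)]).getLast hne' = (p.length : Int) :=
            List.getLast_concat
          have := ih (p ++ [',']) 0 (cuts ++ [(p.length : Int)]) hne'
            (by rw [hlast']; omega)
            (by rw [hlast', ← hcast])
          rw [hlast'] at this
          have hdrop1 : (p ++ [',']).drop ((p.length : Int) + 1).toNat = [] := by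
            have h : ((p.length : Int) + 1).toNat = (p ++ [',']).length := by rw [hlen]; omega
            rw [h, List.drop_length]
          rw [hdrop1] at this
          rw [← this]
          -- align the initial token lists
          have htoks : pvToks ((p ++ [',']) ++ s) (cuts ++ [(p.length : Int)]) =
              (if PySem.Chars.strip (p.drop ((cuts.getLast hne) + 1).toNat) = []
               then pvToks ((p ++ [',']) ++ s) cuts
               else pvToks ((p ++ [',']) ++ s) cuts ++
                 [PySem.Chars.strip (p.drop ((cuts.getLast hne) + 1).toNat)]) := by
            unfold pvToks
            rw [pvPairs_append cuts hne, List.map_append, List.filter_append]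
            have htok := pvTokOf_eq p ([','] ++ s) (cuts.getLast hne) hL0 hL1
            rw [← List.append_assoc] at htok
            simp only [List.map_cons, List.map_nil, htok]
            by_cases hcc : PySem.Chars.strip (p.drop ((cuts.getLast hne) + 1).toNat) = []
            · simp [hcc]
            · simp [hcc]
          rw [htoks]
        · simp only [pvAStep, pvCutStep, if_neg h1, if_neg h2, if_neg h3]
          rw [happ, hcast]
          have := ih (p ++ [c]) d cuts hne hL0 (by rw [← hcast]; omega)
          rw [hdropc] at this
          exact this

-- ===== VERDICT (by name: the statement is the Claim_ definition above) =====
theorem parse_option_values_py_spec : Claim_equal_parse_option_values_py := by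
  intro text _
  unfold Spec_parse_option_values_py parse_option_values_py parse_option_values_py_alt
  by_cases hg : text = "" ∨ text = "-"
  · simp [hg]
  · simp only [hg, if_false]
    have hmain := pvMain text.toList [] 0 [-1] (by simp) (by simp) (by simp)
    simp only [List.nil_append, List.length_nil, Nat.cast_zero, List.drop_nil] at hmain
    have htok0 : pvToks text.toList [-1] = [] := rfl
    rw [htok0] at hmain
    have hsp : pvSplitParens text.toList =
        pvToks text.toList
          (((PySem.List.enumerate text.toList 0).foldl pvCutStep ([-1], 0)).1
            ++ [(text.toList.length : Int)]) := hmain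
    have hB : ∀ (pairs : List (Int × Int)) (d : PySem.Dict String String),
        pairs.foldl (pvBTok text.toList) d =
          ((pairs.map (pvTokOf text.toList)).filter (· ≠ [])).foldl pvATok d := by
      intro pairs d
      rw [pvATok_foldl_filter, List.foldl_map]
      exact PySem.List.foldl_congr_mem _ _ _ _ (fun d ab _ => pvBTok_eq _ d ab)
    rw [hB, hsp]
    rfl
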